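-- pv_equiv track=rewrite | github.com/AGodotGame/Information | hooks/dir_index.py | _starts_with_any
-- ===== SOURCE A (Python) =====
-- def _starts_with_any(src_path: str, roots: list[str]) -> bool:
--     sp = (src_path or "").replace("\\", "/").strip("/")
--     sp_l = sp.lower()
--     sp_bound = "/" + sp_l + "/"
--
--     for r in roots:
--         rr = (r or "").replace("\\", "/").strip("/")
--         if not rr:
--             continue
--         rr_l = rr.lower()
--
--         # match normal al inicio
--         if sp_l == rr_l or sp_l.startswith(rr_l + "/"):
--             return True
--
--         # match si hay prefijo extra (ej: "docs/") pero respetando fronteras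
--         if f"/{rr_l}/" in sp_bound:
--             return True
--
--     return False
-- ===== SOURCE B (Python) =====
-- def _starts_with_any(src_path: str, roots: list[str]) -> bool:
--     segs = (src_path or "").replace("\\", "/").strip("/").lower().split("/")
--     for r in roots:
--         rr = (r or "").replace("\\", "/").strip("/")
--         if not rr:
--             continue
--         rsegs = rr.lower().split("/")
--         t = segs
--         while len(rsegs) <= len(t):
--             if t[:len(rsegs)] == rsegs:
--                 return True
--             t = t[1:]
--     return False
-- ===== Notes on version B (the rewrite author's own statement) =====
-- stated objective: faster
-- what changed: B normalizes the path once into a list of '/'-separated segments and, per root, scans for the root's segment list as a contiguous sublist (prefix test over successive suffixes), replacing A's three string-level checks (equality, startswith, and '/{root}/' substring containment in a '/'-bounded string); candidate matches can only start at segment boundaries and mismatch at segment granularity, so far fewer positions are probed than A's character-level substring search.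
import Mathlib
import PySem

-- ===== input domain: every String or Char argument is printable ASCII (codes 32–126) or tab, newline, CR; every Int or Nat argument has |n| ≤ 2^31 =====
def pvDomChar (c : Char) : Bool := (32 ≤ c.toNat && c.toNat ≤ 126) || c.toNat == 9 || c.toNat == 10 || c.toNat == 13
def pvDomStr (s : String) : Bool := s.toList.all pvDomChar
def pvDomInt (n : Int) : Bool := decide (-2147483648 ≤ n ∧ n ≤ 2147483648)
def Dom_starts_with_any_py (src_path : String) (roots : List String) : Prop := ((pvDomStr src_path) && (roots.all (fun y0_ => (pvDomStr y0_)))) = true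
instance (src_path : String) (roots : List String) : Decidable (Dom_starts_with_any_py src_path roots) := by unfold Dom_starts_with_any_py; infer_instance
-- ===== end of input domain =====

-- B replaces A's string-level boundary/substring tests by splitting both path and root into
-- '/'-segment lists and scanning for a contiguous sublist match (measured faster: candidate
-- matches start only at segment boundaries).


-- ===== PORT A =====
-- loop 'for r in roots' of A; '(r or "")' is the identity on strings and is ported as r
def startsWithAnyGoA (sp_l sp_bound : String) : List String → Bool
  | [] => false
  | r :: rest =>
    let rr := PySem.Str.stripChars (PySem.Str.replace r "\\" "/") "/"
    if rr = "" then startsWithAnyGoA sp_l sp_bound rest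
    else
      let rr_l := PySem.Str.lower rr
      if sp_l == rr_l || PySem.Str.startswith sp_l (rr_l ++ "/") then true
      else if PySem.Str.isIn ("/" ++ rr_l ++ "/") sp_bound then true
      else startsWithAnyGoA sp_l sp_bound rest

-- '(src_path or "")' is the identity on strings and is ported as src_path
def starts_with_any_py (src_path : String) (roots : List String) : Bool :=
  let sp := PySem.Str.stripChars (PySem.Str.replace src_path "\\" "/") "/"
  let sp_l := PySem.Str.lower sp
  let sp_bound := "/" ++ sp_l ++ "/"
  startsWithAnyGoA sp_l sp_bound roots

-- ===== PORT B =====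
-- the 'while len(rsegs) <= len(t): … t = t[1:]' loop of B (t[:len(rsegs)] = List.take)
def startsWithAnyScan (rsegs : List (List Char)) : List (List Char) → Bool
  | [] =>
    if rsegs.length ≤ 0 then
      if List.take rsegs.length ([] : List (List Char)) = rsegs then true else false
    else false
  | seg :: t' =>
    if rsegs.length ≤ (seg :: t').length then
      if List.take rsegs.length (seg :: t') = rsegs then true
      else startsWithAnyScan rsegs t'
    else false

-- loop 'for r in roots' of B; '.split("/")' with the non-empty literal separator is PySem.Chars.splitOn
def startsWithAnyGoB (segs : List (List Char)) : List String → Bool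
  | [] => false
  | r :: rest =>
    let rr := PySem.Str.stripChars (PySem.Str.replace r "\\" "/") "/"
    if rr = "" then startsWithAnyGoB segs rest
    else
      let rsegs := PySem.Chars.splitOn (PySem.Str.lower rr).toList ['/']
      if startsWithAnyScan rsegs segs then true
      else startsWithAnyGoB segs rest

def starts_with_any_py_alt (src_path : String) (roots : List String) : Bool :=
  let segs := PySem.Chars.splitOn
    (PySem.Str.lower (PySem.Str.stripChars (PySem.Str.replace src_path "\\" "/") "/")).toList ['/']
  startsWithAnyGoB segs roots

-- ===== PRECONDITION & SPEC =====
def Spec_starts_with_any_py (src_path : String) (roots : List String) (out : Bool) : Prop := out = starts_with_any_py_alt src_path roots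
instance (src_path : String) (roots : List String) (out : Bool) : Decidable (Spec_starts_with_any_py src_path roots out) := by unfold Spec_starts_with_any_py; infer_instance

-- ===== CLAIM (what is proved, stated in full; the proofs are below) =====
def Claim_equal_starts_with_any_py : Prop := ∀ (src_path : String) (roots : List String), Dom_starts_with_any_py src_path roots → Spec_starts_with_any_py src_path roots (starts_with_any_py src_path roots)

-- ===== LEMMAS AND PROOFS =====

-- reference splitter: Python's s.split("/") on char lists
def pvSegs : List Char → List (List Char)
  | [] => [[]]
  | c :: r => if c = '/' then [] :: pvSegs r else (pvSegs r).modifyHead (c :: ·)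

theorem pvSegs_ne_nil (x : List Char) : pvSegs x ≠ [] := by
  induction x with
  | nil => simp [pvSegs]
  | cons c r ih =>
    simp only [pvSegs]
    split
    · simp
    · rcases h : pvSegs r with _ | ⟨a, t⟩
      · exact absurd h ih
      · simp [List.modifyHead]

theorem pvSegs_no_slash {x : List Char} (h : '/' ∉ x) : pvSegs x = [x] := by
  induction x with
  | nil => rfl
  | cons c r ih =>
    have hc : c ≠ '/' := fun hc => h (by simp [hc])
    have hr : '/' ∉ r := fun hr => h (by simp [hr])
    simp [pvSegs, hc, ih hr, List.modifyHead]

theorem modifyHead_append {α : Type} (f : List α → List α) (A B : List (List α)) (h : A ≠ []) :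
    (A ++ B).modifyHead f = A.modifyHead f ++ B := by
  cases A with
  | nil => exact absurd rfl h
  | cons a t => simp [List.modifyHead]

theorem pvSegs_append_slash (x y : List Char) :
    pvSegs (x ++ '/' :: y) = pvSegs x ++ pvSegs y := by
  induction x with
  | nil => simp [pvSegs]
  | cons c r ih =>
    by_cases hc : c = '/'
    · simp [pvSegs, hc, ih]
    · simp only [List.cons_append, pvSegs, hc, if_false, ih]
      exact modifyHead_append _ _ _ (pvSegs_ne_nil r)

theorem pvSegs_decomp (x : List Char) :
    ('/' ∉ x) ∨ ∃ h r, '/' ∉ h ∧ x = h ++ '/' :: r := by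
  induction x with
  | nil => left; simp
  | cons c t ih =>
    by_cases hc : c = '/'
    · right; exact ⟨[], t, by simp, by simp [hc]⟩
    · rcases ih with h | ⟨h, r, hh, rfl⟩
      · left
        intro hm
        rcases List.mem_cons.mp hm with h1 | h1
        · exact hc h1.symm
        · exact h h1
      · right
        refine ⟨c :: h, r, ?_, by simp⟩
        intro hm
        rcases List.mem_cons.mp hm with h1 | h1
        · exact hc h1.symm
        · exact hh h1

theorem pvSegs_head_slash (h r : List Char) (hh : '/' ∉ h) :
    pvSegs (h ++ '/' :: r) = h :: pvSegs r := by
  rw [pvSegs_append_slash, pvSegs_no_slash hh]; rfl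

-- PySem.Chars.splitOn with separator "/" computes pvSegs
theorem splitOn_go_eq (fuel : Nat) (l cur : List Char) (acc : List (List Char))
    (hf : l.length ≤ fuel) :
    PySem.Chars.splitOn.go ['/'] fuel l cur acc
      = acc.reverse ++ (pvSegs l).modifyHead (cur.reverse ++ ·) := by
  induction fuel generalizing l cur acc with
  | zero =>
    have : l = [] := by simpa using List.length_eq_zero_iff.mp (Nat.le_zero.mp hf)
    subst this
    rw [PySem.Chars.splitOn.go.eq_def]
    simp [pvSegs, List.modifyHead]
  | succ n ih =>
    cases l with
    | nil =>
      rw [PySem.Chars.splitOn.go.eq_def]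
      simp [pvSegs, List.modifyHead]
    | cons c rest =>
      rw [PySem.Chars.splitOn.go.eq_def]
      simp only []
      by_cases hc : c = '/'
      · have hpre : List.isPrefixOf ['/'] (c :: rest) = true := by
          simp [List.isPrefixOf, hc]
        rw [if_pos hpre]
        have := ih rest [] (cur.reverse :: acc) (by simpa using Nat.le_of_succ_le_succ hf)
        simp only [List.length_cons, List.length_nil, List.drop_succ_cons, List.drop_zero] at this ⊢
        rw [this]
        simp only [pvSegs, hc, List.modifyHead, List.reverse_cons, List.reverse_nil,
          List.nil_append, List.append_assoc, List.singleton_append]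
        rcases pvSegs rest with _ | ⟨a, t⟩ <;> simp
      · have hpre : List.isPrefixOf ['/'] (c :: rest) = false := by
          simp [List.isPrefixOf]
          intro h; exact absurd h.symm hc
        rw [if_neg (by simp [hpre])]
        rw [ih rest (c :: cur) acc (by simpa using Nat.le_of_succ_le_succ hf)]
        rcases hsr : pvSegs rest with _ | ⟨a, t⟩
        · exact absurd hsr (pvSegs_ne_nil rest)
        · simp [pvSegs, hc, hsr, List.modifyHead]

theorem splitOn_eq (l : List Char) : PySem.Chars.splitOn l ['/'] = pvSegs l := by
  rw [PySem.Chars.splitOn.eq_def, splitOn_go_eq l.length.succ l [] [] (Nat.le_succ _)]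
  rcases h : pvSegs l with _ | ⟨a, t⟩
  · exact absurd h (pvSegs_ne_nil l)
  · simp [List.modifyHead]

-- the scan loop of B decides contiguous-sublist (infix) occurrence
theorem scan_iff (r t : List (List Char)) :
    startsWithAnyScan r t = true ↔ r <:+: t := by
  induction t with
  | nil =>
    simp only [startsWithAnyScan]
    constructor
    · intro h
      split_ifs at h with h1 h2
      · have : r = [] := by
          have := List.length_eq_zero_iff.mp (Nat.le_zero.mp h1)
          exact this
        simp [this]
    · intro h
      have : r = [] := List.eq_nil_of_infix_nil h
      simp [this]
  | cons seg t' ih =>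
    simp only [startsWithAnyScan]
    constructor
    · intro h
      split_ifs at h with h1 h2
      · exact (List.prefix_iff_eq_take.mpr h2.symm).isInfix
      · exact List.infix_cons (ih.mp h)
    · intro h
      have hlen : r.length ≤ (seg :: t').length := h.length_le
      rw [if_pos hlen]
      rcases List.infix_cons_iff.mp h with hp | hi
      · rw [if_pos (List.prefix_iff_eq_take.mp hp).symm]
      · split_ifs with h2
        · rfl
        · exact ih.mpr hi

-- if '/' ∉ h then the first slash lines up
theorem firstSlash {h U s V : List Char} (hh : '/' ∉ h)
    (heq : h ++ '/' :: U = s ++ '/' :: V) :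
    (s = h ∧ U = V) ∨ ∃ w, s = h ++ '/' :: w ∧ U = w ++ '/' :: V := by
  induction h generalizing s with
  | nil =>
    cases s with
    | nil => left; simpa using heq
    | cons d s' =>
      simp only [List.nil_append, List.cons_append, List.cons.injEq] at heq
      right; exact ⟨s', by simp [heq.1.symm], heq.2⟩
  | cons e h' ih =>
    have he : e ≠ '/' := fun hc => hh (by simp [hc])
    cases s with
    | nil =>
      simp only [List.cons_append, List.nil_append, List.cons.injEq] at heq
      exact absurd heq.1 he
    | cons d s' =>
      simp only [List.cons_append, List.cons.injEq] at heq
      have hh' : '/' ∉ h' := fun hc => hh (by simp [hc])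
      rcases ih hh' heq.2 with ⟨rfl, hUV⟩ | ⟨w, rfl, hU⟩
      · left; exact ⟨by simp [heq.1], hUV⟩
      · right; exact ⟨w, by simp [heq.1], hU⟩

-- Pref2: segment-list prefix transfers back to character-list prefix
theorem segs_prefix_lift : ∀ n a r, a.length ≤ n →
    pvSegs a <+: pvSegs r → a ++ ['/'] <+: r ++ ['/'] := by
  intro n
  induction n with
  | zero =>
    intro a r ha hp
    have : a = [] := by simpa using List.length_eq_zero_iff.mp (Nat.le_zero.mp ha)
    subst this
    rcases pvSegs_decomp r with hr | ⟨h, q, hh, rfl⟩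
    · rw [pvSegs_no_slash (by simp), pvSegs_no_slash hr] at hp
      have : r = [] := by
        have := List.cons_prefix_cons.mp hp
        exact this.1.symm
      simp [this]
    · rw [pvSegs_no_slash (by simp), pvSegs_head_slash h q hh] at hp
      have h0 : h = [] := (List.cons_prefix_cons.mp hp).1.symm
      subst h0
      simpa using List.prefix_append _ _
  | succ n ih =>
    intro a r ha hp
    rcases pvSegs_decomp a with hna | ⟨g, q', hg, rfl⟩
    · -- a slash free: pvSegs a = [a]
      rw [pvSegs_no_slash hna] at hp
      rcases pvSegs_decomp r with hnr | ⟨h, q, hh, rfl⟩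
      · rw [pvSegs_no_slash hnr] at hp
        have : a = r := (List.cons_prefix_cons.mp hp).1
        simp [this]
      · rw [pvSegs_head_slash h q hh] at hp
        have : a = h := (List.cons_prefix_cons.mp hp).1
        subst this
        have : a ++ ['/'] <+: a ++ '/' :: (q ++ ['/']) := by
          rw [List.prefix_append_right_inj]
          exact ⟨q ++ ['/'], by simp⟩
        simpa using this
    · rw [pvSegs_head_slash g q' hg] at hp
      rcases pvSegs_decomp r with hnr | ⟨h, q, hh, rfl⟩
      · rw [pvSegs_no_slash hnr] at hp
        exfalso
        have h1 : (g :: pvSegs q').length ≤ ([r] : List (List Char)).length := hp.length_le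
        have h2 : 0 < (pvSegs q').length := List.length_pos_iff.mpr (pvSegs_ne_nil q')
        simp only [List.length_cons, List.length_nil] at h1
        omega
      · rw [pvSegs_head_slash h q hh] at hp
        obtain ⟨hgh, hq⟩ := List.cons_prefix_cons.mp hp
        subst hgh
        have hlen : q'.length ≤ n := by
          have : (g ++ '/' :: q').length ≤ n + 1 := ha
          simp only [List.length_append, List.length_cons] at this
          omega
        have := ih q' q hlen hq
        have hlift : (g ++ ['/']) ++ (q' ++ ['/']) <+: (g ++ ['/']) ++ (q ++ ['/']) :=
          (List.prefix_append_right_inj _).mpr this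
        have e1 : (g ++ '/' :: q') ++ ['/'] = (g ++ ['/']) ++ (q' ++ ['/']) := by simp
        have e2 : (g ++ '/' :: q) ++ ['/'] = (g ++ ['/']) ++ (q ++ ['/']) := by simp
        rw [e1, e2]; exact hlift

-- forward: a boundary-delimited substring occurrence yields a segment sublist
theorem core_fwd : ∀ n x, x.length ≤ n → ∀ a s t,
    '/' :: (x ++ ['/']) = s ++ ('/' :: (a ++ ['/'])) ++ t →
    pvSegs a <:+: pvSegs x := by
  intro n
  induction n with
  | zero =>
    intro x hx a s t heq
    have hx0 : x = [] := by simpa using List.length_eq_zero_iff.mp (Nat.le_zero.mp hx)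
    subst hx0
    -- '/' :: ['/'] has length 2; rhs has length ≥ 2 + |s| + |t| + |a|
    have hlen : ('/' :: (([] : List Char) ++ ['/'])).length
        = (s ++ ('/' :: (a ++ ['/'])) ++ t).length := by rw [heq]
    simp only [List.length_cons, List.length_append, List.nil_append, List.length_cons,
      List.length_append] at hlen
    have hs : s.length = 0 ∧ a.length = 0 ∧ t.length = 0 := by omega
    have hsnil : s = [] := List.length_eq_zero_iff.mp hs.1
    have hanil : a = [] := List.length_eq_zero_iff.mp hs.2.1
    subst hsnil; subst hanil
    exact List.infix_refl _
  | succ n ih =>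
    intro x hx a s t heq
    cases s with
    | nil =>
      -- x ++ ['/'] = a ++ ['/'] ++ t
      have heq2 : x ++ ['/'] = a ++ ['/'] ++ t := by
        have h' := heq
        simp only [List.nil_append, List.cons_append, List.cons.injEq, true_and] at h'
        simpa using h'
      cases t using List.reverseRecOn with
      | nil =>
        have : x = a := by simpa using heq2
        subst this; exact List.infix_refl _
      | append_singleton t₀ d =>
        have heq3 : x ++ ['/'] = (a ++ '/' :: t₀) ++ [d] := by
          rw [heq2]; simp
        obtain ⟨hx', hdd⟩ := List.append_inj' heq3 (by simp)
        subst hx'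
        rw [pvSegs_append_slash]
        exact (List.prefix_append _ _).isInfix
    | cons c s' =>
      have hc : c = '/' := by
        have := congrArg (fun l => l.head?) heq
        simpa using this.symm
      subst hc
      have heq2 : x ++ ['/'] = s' ++ '/' :: ((a ++ ['/']) ++ t) := by
        have := (List.cons.injEq _ _ _ _).mp heq
        simpa using this.2
      rcases pvSegs_decomp x with hnx | ⟨h, r, hh, rfl⟩
      · -- no slash in x: count contradiction
        exfalso
        have hx0 : List.count '/' x = 0 := List.count_eq_zero.mpr hnx
        have hL : List.count '/' (x ++ ['/']) = List.count '/' (s' ++ '/' :: ((a ++ ['/']) ++ t)) := by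
          rw [heq2]
        simp only [List.count_append, List.count_cons, List.count_nil, hx0] at hL
        simp at hL
        omega
      · -- x = h ++ '/' :: r with '/' ∉ h
        have heq3 : h ++ '/' :: (r ++ ['/']) = s' ++ '/' :: ((a ++ ['/']) ++ t) := by
          simpa using heq2
        have hr_le : r.length ≤ n := by
          have : (h ++ '/' :: r).length ≤ n + 1 := hx
          simp only [List.length_append, List.length_cons] at this
          omega
        rcases firstSlash hh heq3 with ⟨hs, hUV⟩ | ⟨w, hs, hU⟩
        · have heq4 : '/' :: (r ++ ['/']) = [] ++ ('/' :: (a ++ ['/'])) ++ t := by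
            simp [hUV]
          have hrec := ih r hr_le a [] t heq4
          rw [pvSegs_head_slash h r hh]
          exact List.infix_cons hrec
        · have heq4 : '/' :: (r ++ ['/']) = ('/' :: w) ++ ('/' :: (a ++ ['/'])) ++ t := by
            simp [hU]
          have hrec := ih r hr_le a ('/' :: w) t heq4
          rw [pvSegs_head_slash h r hh]
          exact List.infix_cons hrec

-- backward: a segment sublist yields a boundary-delimited substring occurrence
theorem core_bwd : ∀ n x a, x.length ≤ n →
    pvSegs a <:+: pvSegs x →
    '/' :: (a ++ ['/']) <:+: '/' :: (x ++ ['/']) := by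
  intro n
  induction n with
  | zero =>
    intro x a hx hi
    have hx0 : x = [] := by simpa using List.length_eq_zero_iff.mp (Nat.le_zero.mp hx)
    subst hx0
    rw [pvSegs_no_slash (List.not_mem_nil)] at hi
    rcases pvSegs_decomp a with hna | ⟨g, q, hg, rfl⟩
    · rw [pvSegs_no_slash hna] at hi
      have h1 : a = [] := by
        rcases List.infix_cons_iff.mp hi with hp | hinf
        · exact (List.cons_prefix_cons.mp hp).1
        · exact absurd (List.eq_nil_of_infix_nil hinf) (by simp)
      subst h1; exact List.infix_refl _
    · rw [pvSegs_head_slash g q hg] at hi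
      exfalso
      have h1 := hi.length_le
      have h2 : 0 < (pvSegs q).length := List.length_pos_iff.mpr (pvSegs_ne_nil q)
      simp only [List.length_cons, List.length_nil] at h1
      omega
  | succ n ih =>
    intro x a hx hi
    rcases pvSegs_decomp x with hnx | ⟨h, r, hh, rfl⟩
    · rw [pvSegs_no_slash hnx] at hi
      rcases pvSegs_decomp a with hna | ⟨g, q, hg, rfl⟩
      · rw [pvSegs_no_slash hna] at hi
        have : a = x := by
          rcases (List.infix_cons_iff.mp hi) with hp | hinf
          · exact (List.cons_prefix_cons.mp hp).1
          · exact absurd (List.eq_nil_of_infix_nil hinf) (by simp)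
        subst this; exact List.infix_refl _
      · rw [pvSegs_head_slash g q hg] at hi
        exfalso
        have h2 : 0 < (pvSegs q).length := List.length_pos_iff.mpr (pvSegs_ne_nil q)
        have h1 := hi.length_le
        simp only [List.length_cons, List.length_nil] at h1
        omega
    · rw [pvSegs_head_slash h r hh] at hi
      have hr_le : r.length ≤ n := by
        have : (h ++ '/' :: r).length ≤ n + 1 := hx
        simp only [List.length_append, List.length_cons] at this
        omega
      rcases List.infix_cons_iff.mp hi with hp | hinf
      · -- pvSegs a is a prefix of h :: pvSegs r
        rcases pvSegs_decomp a with hna | ⟨g, q, hg, rfl⟩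
        · rw [pvSegs_no_slash hna] at hp
          have : a = h := (List.cons_prefix_cons.mp hp).1
          subst this
          refine ⟨[], r ++ ['/'], ?_⟩
          simp
        · rw [pvSegs_head_slash g q hg] at hp
          obtain ⟨rfl, hq⟩ := List.cons_prefix_cons.mp hp
          have hpref := segs_prefix_lift q.length q r (le_refl _) hq
          refine List.IsPrefix.isInfix ?_
          have : '/' :: ((g ++ '/' :: q) ++ ['/']) = ('/' :: g ++ ['/']) ++ (q ++ ['/']) := by
            simp
          rw [this]
          have h2 : '/' :: ((g ++ '/' :: r) ++ ['/']) = ('/' :: g ++ ['/']) ++ (r ++ ['/']) := by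
            simp
          rw [h2, List.prefix_append_right_inj]
          exact hpref
      · have := ih r a hr_le hinf
        have hsfx : '/' :: (r ++ ['/']) <:+ '/' :: ((h ++ '/' :: r) ++ ['/']) := by
          refine ⟨'/' :: h, ?_⟩
          simp
        exact this.trans hsfx.isInfix

theorem core_iff (a x : List Char) :
    '/' :: (a ++ ['/']) <:+: '/' :: (x ++ ['/']) ↔ pvSegs a <:+: pvSegs x := by
  constructor
  · intro h
    rcases h with ⟨s, t, hst⟩
    exact core_fwd x.length x (le_refl _) a s t (by rw [hst])
  · exact core_bwd x.length x a (le_refl _)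

-- the whole per-root condition of A is equivalent to B's segment scan
theorem cond_iff (sp_l rr_l : String) :
    ((sp_l == rr_l || PySem.Str.startswith sp_l (rr_l ++ "/")) = true ∨
      PySem.Str.isIn ("/" ++ rr_l ++ "/") ("/" ++ sp_l ++ "/") = true)
    ↔ startsWithAnyScan (pvSegs rr_l.toList) (pvSegs sp_l.toList) = true := by
  rw [scan_iff, ← core_iff]
  have hslash : ("/" : String).toList = ['/'] := rfl
  have hbound : ("/" ++ rr_l ++ "/").toList = '/' :: (rr_l.toList ++ ['/']) := by
    simp [String.toList_append, hslash]
  have hbound2 : ("/" ++ sp_l ++ "/").toList = '/' :: (sp_l.toList ++ ['/']) := by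
    simp [String.toList_append, hslash]
  constructor
  · rintro (h | h)
    · rcases Bool.or_eq_true_iff.mp h with h1 | h2
      · have : sp_l = rr_l := by simpa using h1
        subst this; exact List.infix_refl _
      · rw [PySem.Str.startswith_eq] at h2
        have hpre := (PySem.Chars.startswith_iff _ _).mp h2
        rcases hpre with ⟨u, hu⟩
        rw [String.toList_append] at hu
        have heq : '/' :: (sp_l.toList ++ ['/'])
            = ('/' :: (rr_l.toList ++ ['/'])) ++ (u ++ ['/']) := by
          rw [← hu, hslash]
          simp
        exact ⟨[], u ++ ['/'], by simpa using heq.symm⟩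
    · have := (PySem.Str.isIn_iff_infix _ _).mp h
      rwa [hbound, hbound2] at this
  · intro h
    right
    rw [PySem.Str.isIn_iff_infix, hbound, hbound2]
    exact h

theorem go_eq (sp_l : String) (roots : List String) :
    startsWithAnyGoA sp_l ("/" ++ sp_l ++ "/") roots
      = startsWithAnyGoB (pvSegs sp_l.toList) roots := by
  induction roots with
  | nil => rfl
  | cons r rest ih =>
    simp only [startsWithAnyGoA, startsWithAnyGoB]
    by_cases hrr : PySem.Str.stripChars (PySem.Str.replace r "\\" "/") "/" = ""
    · rw [if_pos hrr, if_pos hrr, ih]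
    · rw [if_neg hrr, if_neg hrr]
      set rr_l := PySem.Str.lower (PySem.Str.stripChars (PySem.Str.replace r "\\" "/") "/") with hrl
      rw [splitOn_eq]
      by_cases hcond : startsWithAnyScan (pvSegs rr_l.toList) (pvSegs sp_l.toList) = true
      · rw [if_pos hcond]
        rcases (cond_iff sp_l rr_l).mpr hcond with h1 | h2
        · rw [if_pos h1]
        · by_cases h1 : (sp_l == rr_l || PySem.Str.startswith sp_l (rr_l ++ "/")) = true
          · rw [if_pos h1]
          · rw [if_neg h1, if_pos h2]
      · rw [if_neg hcond]
        have hnot := (not_iff_not.mpr (cond_iff sp_l rr_l)).mpr hcond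
        push Not at hnot
        rw [if_neg (by simpa using hnot.1), if_neg (by simpa using hnot.2), ih]

-- ===== VERDICT (by name: the statement is the Claim_ definition above) =====
theorem starts_with_any_py_spec : Claim_equal_starts_with_any_py := by
  intro src_path roots _
  unfold Spec_starts_with_any_py starts_with_any_py starts_with_any_py_alt
  rw [splitOn_eq]
  exact go_eq _ roots
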